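-- pv_equiv track=rewrite | github.com/MIMPython/MIMPython2023-Assignment | assignment_module02/module02_student04_TranNgocHieu/module02_assignment07_student04_TranNgocHieu.py | encoder_13C
-- ===== SOURCE A (Python) =====
-- def encoder_13C(string):
--     encoded_str = ''
--     str_length = len(string)
--     for i in range(0, str_length):
--         if ord(string[i]) >= 65 and ord(string[i]) <= 77:
--             encoded_str += chr(ord(string[i]) + 13)
--         else:
--             encoded_str += chr(ord(string[i]) - 13)
--     return encoded_str
-- ===== SOURCE B (Python) =====
-- def encoder_13C(string):
--     table = {ord(c): chr(ord(c) + 13) if 65 <= ord(c) <= 77 else chr(ord(c) - 13)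
--              for c in set(string)}
--     return string.translate(table)
-- ===== Notes on version B (the rewrite author's own statement) =====
-- stated objective: idiomatic
-- what changed: B replaces the index loop with per-character string appends by building a translation table over the distinct characters once and doing a single str.translate pass.
import Mathlib
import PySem

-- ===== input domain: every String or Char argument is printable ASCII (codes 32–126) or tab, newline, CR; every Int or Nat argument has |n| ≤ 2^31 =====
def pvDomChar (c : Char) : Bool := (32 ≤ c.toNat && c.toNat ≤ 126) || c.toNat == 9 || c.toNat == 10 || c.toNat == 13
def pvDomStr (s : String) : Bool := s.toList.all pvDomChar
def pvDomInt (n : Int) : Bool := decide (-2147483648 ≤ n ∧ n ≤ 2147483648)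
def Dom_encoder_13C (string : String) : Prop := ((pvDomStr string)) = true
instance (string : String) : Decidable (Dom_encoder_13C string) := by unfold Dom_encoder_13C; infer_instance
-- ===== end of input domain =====

-- B builds a translation table over the distinct characters and maps the string through it
-- in one library-driven pass, instead of A's index loop with per-character string appends.

-- chr(n): exact for the codes reached under Pre_ (all inserted codes are in [0, 139])
def pyChr (n : Int) : Char := Char.ofNat n.toNat

-- ===== PORT A =====
def encoder_13C (string : String) : String :=
  let cs := string.toList
  let encoded : List Char :=
    (PySem.List.pyRange 0 (PySem.List.len cs) 1).foldl
      (fun acc i =>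
        let c := PySem.List.pyGetD cs i ' '
        if 65 ≤ (c.toNat : Int) ∧ (c.toNat : Int) ≤ 77 then
          acc ++ [pyChr ((c.toNat : Int) + 13)]
        else
          acc ++ [pyChr ((c.toNat : Int) - 13)])
      []
  String.mk encoded

-- ===== PORT B =====
def encoder_13C_alt (string : String) : String :=
  let table : PySem.Dict Int Char :=
    (PySem.Set.ofList string.toList).foldl
      (fun d c =>
        d.insert ((c.toNat : Int))
          (if 65 ≤ (c.toNat : Int) ∧ (c.toNat : Int) ≤ 77 then
            pyChr ((c.toNat : Int) + 13)
          else
            pyChr ((c.toNat : Int) - 13)))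
      PySem.Dict.empty
  -- str.translate: each char is replaced by its table entry, kept unchanged if absent
  String.mk (string.toList.map (fun c => ((table.get? ((c.toNat : Int))).getD c)))

-- ===== PRECONDITION & SPEC =====
-- Pre_ excludes exactly the strings containing a character with code point < 13
-- (tab, newline in Dom): there Python's chr(ord(c) - 13) raises ValueError in both A and B.
def Pre_encoder_13C (string : String) : Prop :=
  string.toList.all (fun c => 13 ≤ c.toNat) = true
instance (string : String) : Decidable (Pre_encoder_13C string) := by
  unfold Pre_encoder_13C; infer_instance

def pvWitness_encoder_13C : String := "Hello"

def Spec_encoder_13C (string : String) (out : String) : Prop := out = encoder_13C_alt string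
instance (string : String) (out : String) : Decidable (Spec_encoder_13C string out) := by
  unfold Spec_encoder_13C; infer_instance

-- ===== CLAIM (what is proved, stated in full; the proofs are below) =====
def Claim_equal_encoder_13C : Prop :=
  ∀ (string : String), Dom_encoder_13C string → Pre_encoder_13C string →
    Spec_encoder_13C string (encoder_13C string)

-- ===== LEMMAS AND PROOFS =====

-- the common per-character shift, as a function of the code point
def pvShiftCode (n : Int) : Char :=
  if 65 ≤ n ∧ n ≤ 77 then pyChr (n + 13) else pyChr (n - 13)

theorem foldl_append_singleton_eq_map (l : List Char) (init : List Char) :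
    l.foldl (fun acc c => acc ++ [pvShiftCode (c.toNat : Int)]) init =
      init ++ l.map (fun c => pvShiftCode (c.toNat : Int)) := by
  induction l generalizing init with
  | nil => simp
  | cons a t ih => simp [ih]

theorem encoder_13C_eq_map (s : String) :
    encoder_13C s = String.mk (s.toList.map (fun c => pvShiftCode (c.toNat : Int))) := by
  show String.mk
      ((PySem.List.pyRange 0 (PySem.List.len s.toList) 1).foldl
        (fun acc i =>
          let c := PySem.List.pyGetD s.toList i ' '
          if 65 ≤ (c.toNat : Int) ∧ (c.toNat : Int) ≤ 77 then
            acc ++ [pyChr ((c.toNat : Int) + 13)]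
          else
            acc ++ [pyChr ((c.toNat : Int) - 13)])
        []) = _
  congr 1
  rw [show (fun (acc : List Char) (i : Int) =>
        let c := PySem.List.pyGetD s.toList i ' '
        if 65 ≤ (c.toNat : Int) ∧ (c.toNat : Int) ≤ 77 then
          acc ++ [pyChr ((c.toNat : Int) + 13)]
        else
          acc ++ [pyChr ((c.toNat : Int) - 13)]) =
      (fun (acc : List Char) (i : Int) =>
        acc ++ [pvShiftCode (((PySem.List.pyGetD s.toList i ' ').toNat : Int))])
      from by
        funext acc i
        exact (apply_ite (fun x => acc ++ [x]) _ _ _).symm]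
  rw [PySem.List.foldl_pyRange_zero_pyGetD s.toList ' '
      (fun acc c => acc ++ [pvShiftCode ((c.toNat : Int))]) []]
  rw [foldl_append_singleton_eq_map s.toList []]
  simp

theorem table_get (l : List Char) (d : PySem.Dict Int Char) (k : Int) :
    (l.foldl (fun d c => d.insert ((c.toNat : Int)) (pvShiftCode (c.toNat : Int))) d).get? k =
      if k ∈ l.map (fun c => ((c.toNat : Int))) then some (pvShiftCode k) else d.get? k := by
  induction l generalizing d with
  | nil => simp
  | cons a t ih =>
      simp only [List.foldl_cons, ih, List.map_cons, List.mem_cons]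
      by_cases ht : k ∈ t.map (fun c => ((c.toNat : Int)))
      · simp [ht]
      · by_cases ha : k = (a.toNat : Int)
        · subst ha
          simp [ht, PySem.Dict.get?_insert_self]
        · rw [PySem.Dict.get?_insert_of_ne]
          · simp [ht, ha]
          · exact ha

theorem encoder_13C_alt_eq_map (s : String) :
    encoder_13C_alt s = String.mk (s.toList.map (fun c => pvShiftCode (c.toNat : Int))) := by
  show String.mk (s.toList.map (fun c =>
      (((PySem.Set.ofList s.toList).foldl
        (fun d c =>
          d.insert ((c.toNat : Int))
            (if 65 ≤ (c.toNat : Int) ∧ (c.toNat : Int) ≤ 77 then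
              pyChr ((c.toNat : Int) + 13)
            else
              pyChr ((c.toNat : Int) - 13)))
        PySem.Dict.empty).get? ((c.toNat : Int))).getD c)) = _
  congr 1
  apply List.map_congr_left
  intro c hc
  have hfold : PySem.Set.ofList s.toList =
      s.toList.foldl PySem.Set.add [] := PySem.Set.ofList_eq_foldl s.toList
  rw [show (fun (d : PySem.Dict Int Char) (c : Char) =>
        d.insert ((c.toNat : Int))
          (if 65 ≤ (c.toNat : Int) ∧ (c.toNat : Int) ≤ 77 then
            pyChr ((c.toNat : Int) + 13)
          else
            pyChr ((c.toNat : Int) - 13))) =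
      (fun (d : PySem.Dict Int Char) (c : Char) =>
        d.insert ((c.toNat : Int)) (pvShiftCode (c.toNat : Int))) from rfl]
  rw [table_get]
  have hmem : (c.toNat : Int) ∈ (PySem.Set.ofList s.toList).map (fun c => ((c.toNat : Int))) := by
    exact List.mem_map_of_mem ((PySem.Set.mem_ofList _ _).mpr hc)
  simp [hmem]

-- ===== VERDICT (by name: the statement is the Claim_ definition above) =====
theorem encoder_13C_spec : Claim_equal_encoder_13C := by
  intro s _ _
  unfold Spec_encoder_13C
  rw [encoder_13C_eq_map, encoder_13C_alt_eq_map]
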